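-- pv_equiv track=rewrite | github.com/davidkruzel/Thistlethwaite-polynomial | main.py | is_spanning_tree
-- ===== SOURCE A (Python) =====
-- def is_connected(graph_edges, num_vertices):
--   if graph_edges == []:
--     return False
--   connected_vertices = set()
--   connected_vertices = connected_vertices.union(graph_edges[0][2])
--   test = 0
--   while test < 1:
--     for v in connected_vertices:
--       for edge in graph_edges:
--         if (v in edge[2]) and (edge[2].issubset(connected_vertices) == False):
--           connected_vertices = connected_vertices.union(edge[2])
--           test += 1
--     if test == 0:
--       if (len(connected_vertices) < num_vertices):
--         return False
--       else:
--         return True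
--     else:
--       test = 0
--
-- def is_spanning_tree(num_vertices_of_graph, subgraph_edges):
--   if not is_connected(subgraph_edges, num_vertices_of_graph):
--     return False
--   vertices_in_subgraph = set()
--   for edge in subgraph_edges:
--     vertices_in_subgraph = vertices_in_subgraph.union(edge[2])
--   if ( len(vertices_in_subgraph) == num_vertices_of_graph ) and ( len(subgraph_edges) == (num_vertices_of_graph - 1)):
--     return(True)
--   else:
--     return(False)
-- ===== SOURCE B (Python) =====
-- def is_spanning_tree(num_vertices_of_graph, subgraph_edges):
--   # counting checks first, then one DFS over a prebuilt vertex->edge-sets adjacency map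
--   if not subgraph_edges or len(subgraph_edges) != num_vertices_of_graph - 1:
--     return False
--   adjacency = {}
--   vertices = set()
--   for edge in subgraph_edges:
--     s = edge[2]
--     vertices |= s
--     for v in s:
--       adjacency.setdefault(v, []).append(s)
--   if len(vertices) != num_vertices_of_graph:
--     return False
--   seen = set(subgraph_edges[0][2])
--   stack = list(seen)
--   while stack:
--     v = stack.pop()
--     for s in adjacency.get(v, ()):
--       for u in s:
--         if u not in seen:
--           seen.add(u)
--           stack.append(u)
--   return len(seen) == num_vertices_of_graph
-- ===== Notes on version B (the rewrite author's own statement) =====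
-- stated objective: faster
-- what changed: A saturates the reachable vertex set by repeatedly re-scanning the whole current set against the whole edge list until a full pass changes nothing; B does the count checks first and then a single DFS with an explicit stack over a vertex-to-incident-edge-sets map built in one pass.
import Mathlib
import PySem

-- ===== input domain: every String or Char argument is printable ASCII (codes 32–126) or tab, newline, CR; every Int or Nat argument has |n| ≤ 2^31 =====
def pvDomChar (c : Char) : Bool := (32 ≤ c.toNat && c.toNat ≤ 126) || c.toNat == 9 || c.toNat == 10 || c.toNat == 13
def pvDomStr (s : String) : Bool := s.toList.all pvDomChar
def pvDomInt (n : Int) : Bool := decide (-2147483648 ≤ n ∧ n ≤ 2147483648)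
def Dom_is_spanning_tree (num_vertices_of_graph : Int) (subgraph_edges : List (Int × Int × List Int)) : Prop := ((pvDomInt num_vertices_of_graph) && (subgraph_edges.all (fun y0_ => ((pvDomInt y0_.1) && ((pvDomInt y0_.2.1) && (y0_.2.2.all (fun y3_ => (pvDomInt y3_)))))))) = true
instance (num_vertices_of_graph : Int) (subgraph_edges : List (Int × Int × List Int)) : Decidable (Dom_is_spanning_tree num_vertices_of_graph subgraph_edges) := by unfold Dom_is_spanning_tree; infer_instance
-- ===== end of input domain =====

-- B replaces A's repeated whole-set/whole-edge-list saturation passes with one DFS over a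
-- prebuilt vertex→incident-edge-sets map (plus the same counting checks); objective: faster.

-- ===== PORT A =====
-- inner 'for edge in graph_edges' of is_connected (state = (connected_vertices, test))
def pvForEdgesA (graph_edges : List (Int × Int × List Int)) (v : Int)
    (st : PySem.Set Int × Nat) : PySem.Set Int × Nat :=
  graph_edges.foldl (fun st edge =>
    if PySem.Set.contains edge.2.2 v && !(PySem.Set.issubset edge.2.2 st.1)
    then (PySem.Set.union st.1 edge.2.2, st.2 + 1) else st) st

-- one pass of the 'while test < 1' body: 'for v in connected_vertices' over the snapshot
def pvPassA (graph_edges : List (Int × Int × List Int)) (connected : PySem.Set Int) :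
    PySem.Set Int × Nat :=
  connected.foldl (fun st v => pvForEdgesA graph_edges v st) (connected, 0)

-- all vertices occurring in the edges: an upper bound for the growing set, used only as fuel
def pvAllVertsA (graph_edges : List (Int × Int × List Int)) : PySem.Set Int :=
  graph_edges.foldl (fun acc e => PySem.Set.union acc e.2.2) PySem.Set.empty

-- the 'while test < 1' loop; fuel only totalises it (the set strictly grows on each repeat,
-- so fuel = |all vertices| + 1 is never exhausted — proved in the lemmas below)
def pvWhileA (graph_edges : List (Int × Int × List Int)) (num_vertices : Int) :
    Nat → PySem.Set Int → Bool
  | 0, _ => false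
  | fuel + 1, connected =>
    let st := pvPassA graph_edges connected
    if st.2 = 0 then
      if PySem.Set.len st.1 < num_vertices then false else true
    else pvWhileA graph_edges num_vertices fuel st.1

def pvIsConnectedA (graph_edges : List (Int × Int × List Int)) (num_vertices : Int) : Bool :=
  match graph_edges with
  | [] => false
  | e0 :: _ =>
    pvWhileA graph_edges num_vertices ((pvAllVertsA graph_edges).length + 1)
      (PySem.Set.union PySem.Set.empty e0.2.2)

def is_spanning_tree (num_vertices_of_graph : Int) (subgraph_edges : List (Int × Int × List Int)) : Bool :=
  if !(pvIsConnectedA subgraph_edges num_vertices_of_graph) then false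
  else
    let vertices_in_subgraph :=
      subgraph_edges.foldl (fun acc e => PySem.Set.union acc e.2.2) PySem.Set.empty
    if PySem.Set.len vertices_in_subgraph = num_vertices_of_graph
        && ((subgraph_edges.length : Int) = num_vertices_of_graph - 1) then true else false

-- ===== PORT B =====
-- one loop building the vertex set and the adjacency map vertex → list of incident edge sets
def pvBuildB (subgraph_edges : List (Int × Int × List Int)) :
    PySem.Dict Int (List (List Int)) × PySem.Set Int :=
  subgraph_edges.foldl (fun p edge =>
    (edge.2.2.foldl (fun a v => a.insert v (a.getD v [] ++ [edge.2.2])) p.1,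
     PySem.Set.union p.2 edge.2.2)) (PySem.Dict.empty, PySem.Set.empty)

-- the DFS 'while stack' loop (push/pop at the head = the same LIFO as Source B's append/pop);
-- fuel only totalises it (2·|vertices| + |initial stack| + 1 is never exhausted)
def pvDfsB (adjacency : PySem.Dict Int (List (List Int))) :
    Nat → List Int → PySem.Set Int → PySem.Set Int
  | 0, _, seen => seen
  | _ + 1, [], seen => seen
  | fuel + 1, v :: stack, seen =>
    let p := (adjacency.getD v []).foldl (fun (q : List Int × List Int) s =>
        s.foldl (fun q u => if u ∈ q.1 then q else (q.1 ++ [u], u :: q.2)) q) (seen, stack)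
    pvDfsB adjacency fuel p.2 p.1

def is_spanning_tree_alt (num_vertices_of_graph : Int) (subgraph_edges : List (Int × Int × List Int)) : Bool :=
  match subgraph_edges with
  | [] => false
  | e0 :: _ =>
    if (subgraph_edges.length : Int) ≠ num_vertices_of_graph - 1 then false
    else
      let p := pvBuildB subgraph_edges
      if PySem.Set.len p.2 ≠ num_vertices_of_graph then false
      else
        let seen0 := PySem.Set.ofList e0.2.2
        let seen := pvDfsB p.1 (2 * p.2.length + seen0.length + 1) seen0 seen0
        decide (PySem.Set.len seen = num_vertices_of_graph)

-- ===== PRECONDITION & SPEC =====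
def Spec_is_spanning_tree (num_vertices_of_graph : Int) (subgraph_edges : List (Int × Int × List Int)) (out : Bool) : Prop := out = is_spanning_tree_alt num_vertices_of_graph subgraph_edges
instance (num_vertices_of_graph : Int) (subgraph_edges : List (Int × Int × List Int)) (out : Bool) : Decidable (Spec_is_spanning_tree num_vertices_of_graph subgraph_edges out) := by unfold Spec_is_spanning_tree; infer_instance

-- ===== CLAIM (what is proved, stated in full; the proofs are below) =====
def Claim_equal_is_spanning_tree : Prop := ∀ (num_vertices_of_graph : Int) (subgraph_edges : List (Int × Int × List Int)), Dom_is_spanning_tree num_vertices_of_graph subgraph_edges → Spec_is_spanning_tree num_vertices_of_graph subgraph_edges (is_spanning_tree num_vertices_of_graph subgraph_edges)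


-- ===== LEMMAS AND PROOFS =====

-- reachability from the vertex set S0 through edges (an edge's vertex set is merged whenever hit)
inductive pvReach (edges : List (Int × Int × List Int)) (S0 : List Int) : Int → Prop
  | base {v : Int} : v ∈ S0 → pvReach edges S0 v
  | step {e : Int × Int × List Int} {u v : Int} : e ∈ edges → u ∈ e.2.2 →
      pvReach edges S0 u → v ∈ e.2.2 → pvReach edges S0 v

theorem pv_nodup_length_le {l l' : List Int} (h : l.Nodup) (hs : l ⊆ l') :
    l.length ≤ l'.length := by
  calc l.length = l.toFinset.card := (List.toFinset_card_of_nodup h).symm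
    _ ≤ l'.toFinset.card := Finset.card_le_card (fun x hx => by
        simp only [List.mem_toFinset] at hx ⊢; exact hs hx)
    _ ≤ l'.length := l'.toFinset_card_le

theorem pv_nodup_length_eq {l l' : List Int} (h : l.Nodup) (h' : l'.Nodup)
    (hm : ∀ x, x ∈ l ↔ x ∈ l') : l.length = l'.length :=
  List.Perm.length_eq ((List.perm_ext_iff_of_nodup h h').mpr hm)

theorem pv_setLen (s : List Int) : PySem.Set.len s = (s.length : Int) := rfl

theorem pv_union_length_lt {s : PySem.Set Int} {t : List Int} (hn : s.Nodup)
    (h : PySem.Set.issubset t s = false) : s.length < (PySem.Set.union s t).length := by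
  have h' : ¬ (PySem.Set.issubset t s = true) := by simp [h]
  rw [PySem.Set.issubset_iff] at h'
  push_neg at h'
  obtain ⟨x, hxt, hxs⟩ := h'
  rw [show PySem.Set.union s t = s ++ (PySem.Set.ofList t).filter (fun y => !(PySem.Set.contains s y)) from
    PySem.Set.update_eq_append_filter .., List.length_append]
  have hx : x ∈ (PySem.Set.ofList t).filter (fun y => !(PySem.Set.contains s y)) := by
    rw [List.mem_filter]
    refine ⟨(PySem.Set.mem_ofList ..).mpr hxt, ?_⟩
    simp only [Bool.not_eq_true', ← Bool.not_eq_true, PySem.Set.contains_iff]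
    simpa using hxs
  have := List.length_pos_of_mem hx
  omega

theorem pv_mem_foldl_union (l : List (Int × Int × List Int)) (acc : PySem.Set Int) (x : Int) :
    x ∈ l.foldl (fun a e => PySem.Set.union a e.2.2) acc ↔
      x ∈ acc ∨ ∃ e ∈ l, x ∈ e.2.2 := by
  induction l generalizing acc with
  | nil => simp
  | cons e l ih =>
    simp only [List.foldl_cons, ih, PySem.Set.mem_union, List.mem_cons]
    constructor
    · rintro (⟨h | h⟩ | ⟨e', he', hx⟩)
      · exact Or.inl h
      · exact Or.inr ⟨e, Or.inl rfl, h⟩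
      · exact Or.inr ⟨e', Or.inr he', hx⟩
    · rintro (h | ⟨e', he', hx⟩)
      · exact Or.inl (Or.inl h)
      · rcases he' with rfl | he'
        · exact Or.inl (Or.inr hx)
        · exact Or.inr ⟨e', he', hx⟩

theorem pv_nodup_foldl_union (l : List (Int × Int × List Int)) (acc : PySem.Set Int)
    (h : acc.Nodup) : (l.foldl (fun a e => PySem.Set.union a e.2.2) acc).Nodup := by
  induction l generalizing acc with
  | nil => exact h
  | cons e l ih => exact ih _ (PySem.Set.nodup_union _ _ h)

-- ---- A side ----

theorem pvForEdgesA_spec (edges : List (Int × Int × List Int)) (v : Int)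
    (st : PySem.Set Int × Nat) :
    st.1 ⊆ (pvForEdgesA edges v st).1 ∧
    (st.1.Nodup → (pvForEdgesA edges v st).1.Nodup) ∧
    st.2 ≤ (pvForEdgesA edges v st).2 ∧
    (st.1.Nodup → st.2 < (pvForEdgesA edges v st).2 →
      st.1.length < (pvForEdgesA edges v st).1.length) ∧
    ((pvForEdgesA edges v st).2 = st.2 → (pvForEdgesA edges v st).1 = st.1 ∧
      ∀ e ∈ edges, v ∈ e.2.2 → PySem.Set.issubset e.2.2 st.1 = true) ∧
    (∀ x, x ∈ (pvForEdgesA edges v st).1 →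
      x ∈ st.1 ∨ ∃ e ∈ edges, v ∈ e.2.2 ∧ x ∈ e.2.2) := by
  induction edges generalizing st with
  | nil =>
    exact ⟨fun x h => h, id, le_refl _, fun _ h => absurd h (lt_irrefl _),
      fun _ => ⟨rfl, by simp⟩, fun x h => Or.inl h⟩
  | cons e rest ih =>
    have hstep : pvForEdgesA (e :: rest) v st = pvForEdgesA rest v
        (if PySem.Set.contains e.2.2 v && !(PySem.Set.issubset e.2.2 st.1)
         then (PySem.Set.union st.1 e.2.2, st.2 + 1) else st) := rfl
    by_cases hc : (PySem.Set.contains e.2.2 v && !(PySem.Set.issubset e.2.2 st.1)) = true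
    · rw [hstep, if_pos hc]
      obtain ⟨i1, i2, i3, i4, i5, i6⟩ := ih (PySem.Set.union st.1 e.2.2, st.2 + 1)
      rw [Bool.and_eq_true] at hc
      have hv : v ∈ e.2.2 := (PySem.Set.contains_iff ..).mp hc.1
      have hns : PySem.Set.issubset e.2.2 st.1 = false := by
        have := hc.2; simp only [Bool.not_eq_true'] at this; exact this
      have hsub : st.1 ⊆ PySem.Set.union st.1 e.2.2 :=
        fun x hx => (PySem.Set.mem_union ..).mpr (Or.inl hx)
      refine ⟨fun x hx => i1 (hsub hx), fun hn => i2 (PySem.Set.nodup_union _ _ hn),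
        le_trans (Nat.le_succ _) i3, ?_, ?_, ?_⟩
      · intro hn _
        exact lt_of_lt_of_le (pv_union_length_lt hn hns)
          (pv_nodup_length_le (PySem.Set.nodup_union _ _ hn) i1)
      · intro h; exfalso; simp only [] at i3; omega
      · intro x hx
        rcases i6 x hx with h | ⟨e', he', hv', hx'⟩
        · rcases (PySem.Set.mem_union ..).mp h with h | h
          · exact Or.inl h
          · exact Or.inr ⟨e, List.mem_cons_self .., hv, h⟩
        · exact Or.inr ⟨e', List.mem_cons_of_mem _ he', hv', hx'⟩
    · rw [hstep, if_neg hc]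
      obtain ⟨i1, i2, i3, i4, i5, i6⟩ := ih st
      refine ⟨i1, i2, i3, i4, fun h => ⟨(i5 h).1, ?_⟩, ?_⟩
      · intro e' he' hv'
        rcases List.mem_cons.mp he' with rfl | he'
        · by_cases h2 : PySem.Set.issubset e'.2.2 st.1 = true
          · exact h2
          · exfalso; apply hc; rw [Bool.and_eq_true]
            refine ⟨(PySem.Set.contains_iff ..).mpr hv', ?_⟩
            simp only [Bool.not_eq_true', Bool.not_eq_true] at h2 ⊢
            exact h2
        · exact (i5 h).2 e' he' hv'
      · intro x hx
        rcases i6 x hx with h | ⟨e', he', hv', hx'⟩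
        · exact Or.inl h
        · exact Or.inr ⟨e', List.mem_cons_of_mem _ he', hv', hx'⟩

theorem pvPassFoldA_spec (edges : List (Int × Int × List Int)) (S : List Int) :
    ∀ st : PySem.Set Int × Nat,
    st.1 ⊆ (S.foldl (fun st v => pvForEdgesA edges v st) st).1 ∧
    (st.1.Nodup → (S.foldl (fun st v => pvForEdgesA edges v st) st).1.Nodup) ∧
    st.2 ≤ (S.foldl (fun st v => pvForEdgesA edges v st) st).2 ∧
    (st.1.Nodup → st.2 < (S.foldl (fun st v => pvForEdgesA edges v st) st).2 →
      st.1.length < (S.foldl (fun st v => pvForEdgesA edges v st) st).1.length) ∧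
    ((S.foldl (fun st v => pvForEdgesA edges v st) st).2 = st.2 →
      (S.foldl (fun st v => pvForEdgesA edges v st) st).1 = st.1 ∧
      ∀ v ∈ S, ∀ e ∈ edges, v ∈ e.2.2 → PySem.Set.issubset e.2.2 st.1 = true) ∧
    (∀ x, x ∈ (S.foldl (fun st v => pvForEdgesA edges v st) st).1 →
      x ∈ st.1 ∨ ∃ e ∈ edges, (∃ w ∈ S, w ∈ e.2.2) ∧ x ∈ e.2.2) := by
  induction S with
  | nil =>
    exact fun st => ⟨fun x h => h, id, le_refl _, fun _ h => absurd h (lt_irrefl _),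
      fun _ => ⟨rfl, by simp⟩, fun x h => Or.inl h⟩
  | cons w S ih =>
    intro st
    obtain ⟨m1, m2, m3, m4, m5, m6⟩ := pvForEdgesA_spec edges w st
    obtain ⟨i1, i2, i3, i4, i5, i6⟩ := ih (pvForEdgesA edges w st)
    have hstep : (w :: S).foldl (fun st v => pvForEdgesA edges v st) st =
        S.foldl (fun st v => pvForEdgesA edges v st) (pvForEdgesA edges w st) := rfl
    rw [hstep]
    refine ⟨fun x hx => i1 (m1 hx), fun hn => i2 (m2 hn), le_trans m3 i3, ?_, ?_, ?_⟩
    · intro hn h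
      by_cases h2 : st.2 < (pvForEdgesA edges w st).2
      · exact lt_of_lt_of_le (m4 hn h2) (pv_nodup_length_le (m2 hn) i1)
      · have he2 : (pvForEdgesA edges w st).2 = st.2 := Nat.le_antisymm (Nat.not_lt.mp h2) m3
        have he1 : (pvForEdgesA edges w st).1 = st.1 := (m5 he2).1
        have := i4 (he1 ▸ hn) (by rw [he2]; exact h)
        rwa [he1] at this
    · intro h
      have he2 : (pvForEdgesA edges w st).2 = st.2 := Nat.le_antisymm (h ▸ i3) m3
      have he1 : (pvForEdgesA edges w st).1 = st.1 := (m5 he2).1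
      obtain ⟨j1, j2⟩ := i5 (by rw [he2]; exact h)
      refine ⟨by rw [j1, he1], ?_⟩
      intro v hv e he hve
      rcases List.mem_cons.mp hv with rfl | hv
      · exact (m5 he2).2 e he hve
      · have := j2 v hv e he hve; rwa [he1] at this
    · intro x hx
      rcases i6 x hx with h | ⟨e, he, ⟨w', hw', hwe⟩, hxe⟩
      · rcases m6 x h with h | ⟨e, he, hve, hxe⟩
        · exact Or.inl h
        · exact Or.inr ⟨e, he, ⟨w, List.mem_cons_self .., hve⟩, hxe⟩
      · exact Or.inr ⟨e, he, ⟨w', List.mem_cons_of_mem _ hw', hwe⟩, hxe⟩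

theorem pv_closed_reach {edges : List (Int × Int × List Int)} {S0 C : List Int}
    (hS0 : ∀ x ∈ S0, x ∈ C)
    (hcl : ∀ v ∈ C, ∀ e ∈ edges, v ∈ e.2.2 → PySem.Set.issubset e.2.2 C = true) :
    ∀ v, pvReach edges S0 v → v ∈ C := by
  intro v h
  induction h with
  | base h => exact hS0 _ h
  | step he hu _ hv ihu =>
    have := hcl _ ihu _ he hu
    rw [PySem.Set.issubset_iff] at this
    exact this _ hv

theorem pvWhileA_eq (edges : List (Int × Int × List Int)) (num : Int) (S0 R : List Int)
    (hRnd : R.Nodup) (hRm : ∀ x, x ∈ R ↔ pvReach edges S0 x) :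
    ∀ (fuel : Nat) (C : PySem.Set Int), C.Nodup → (∀ x ∈ S0, x ∈ C) →
    (∀ x ∈ C, pvReach edges S0 x) → R.length < fuel + C.length →
    pvWhileA edges num fuel C = !decide ((R.length : Int) < num) := by
  intro fuel
  induction fuel with
  | zero =>
    intro C hnd hS0 hRe hlen
    exfalso
    have hCR : C ⊆ R := fun x hx => (hRm x).mpr (hRe x hx)
    have := pv_nodup_length_le hnd hCR
    omega
  | succ fuel ih =>
    intro C hnd hS0 hRe hlen
    obtain ⟨p1, p2, p3, p4, p5, p6⟩ := pvPassFoldA_spec edges C (C, 0)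
    have hgoal : pvWhileA edges num (fuel + 1) C =
        if (pvPassA edges C).2 = 0 then
          (if PySem.Set.len (pvPassA edges C).1 < num then false else true)
        else pvWhileA edges num fuel (pvPassA edges C).1 := rfl
    rw [hgoal]
    by_cases h0 : (pvPassA edges C).2 = 0
    · rw [if_pos h0]
      obtain ⟨hfix, hcl⟩ := p5 h0
      have hfix' : (pvPassA edges C).1 = C := hfix
      have hcl' : ∀ v ∈ C, ∀ e ∈ edges, v ∈ e.2.2 → PySem.Set.issubset e.2.2 C = true := hcl
      have hRC : ∀ x, x ∈ R ↔ x ∈ C := fun x =>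
        ⟨fun hx => pv_closed_reach hS0 hcl' x ((hRm x).mp hx),
         fun hx => (hRm x).mpr (hRe x hx)⟩
      have hlenRC : R.length = C.length := pv_nodup_length_eq hRnd hnd hRC
      rw [hfix', pv_setLen, ← hlenRC]
      by_cases hlt : (R.length : Int) < num
      · rw [if_pos hlt]; simp [hlt]
      · rw [if_neg hlt]; simp [hlt]
    · rw [if_neg h0]
      apply ih
      · exact p2 hnd
      · exact fun x hx => p1 (hS0 x hx)
      · intro x hx
        rcases p6 x hx with h | ⟨e, he, ⟨w, hwC, hwe⟩, hxe⟩
        · exact hRe x h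
        · exact pvReach.step he hwe (hRe w hwC) hxe
      · have hgrow : C.length < (pvPassA edges C).1.length :=
          p4 hnd (Nat.pos_of_ne_zero h0)
        omega

-- ---- B side ----

theorem pv_getD_insert (d : PySem.Dict Int (List (List Int))) (k k' : Int)
    (v : List (List Int)) :
    (d.insert k v).getD k' [] = if k = k' then v else d.getD k' [] := by
  by_cases h : k = k'
  · simp [h, pysem]
  · simp [h, pysem]
    exact fun h' => absurd h'.symm h

theorem pvBuildB_proj : ∀ (l : List (Int × Int × List Int))
    (d : PySem.Dict Int (List (List Int))) (v0 : PySem.Set Int),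
    l.foldl (fun p edge =>
        (edge.2.2.foldl (fun a v => a.insert v (a.getD v [] ++ [edge.2.2])) p.1,
         PySem.Set.union p.2 edge.2.2)) (d, v0)
      = (l.foldl (fun a edge =>
            edge.2.2.foldl (fun a v => a.insert v (a.getD v [] ++ [edge.2.2])) a) d,
         l.foldl (fun a e => PySem.Set.union a e.2.2) v0) := by
  intro l
  induction l with
  | nil => intro d v0; rfl
  | cons e l ih => intro d v0; exact ih _ _

theorem pv_adj_inner_mem (s0 : List Int) : ∀ (t : List Int)
    (d : PySem.Dict Int (List (List Int))) (v : Int) (s : List Int),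
    s ∈ (t.foldl (fun a w => a.insert w (a.getD w [] ++ [s0])) d).getD v [] ↔
      s ∈ d.getD v [] ∨ (v ∈ t ∧ s = s0) := by
  intro t
  induction t with
  | nil => simp
  | cons w t ih =>
    intro d v s
    have hstep : (w :: t).foldl (fun a w => a.insert w (a.getD w [] ++ [s0])) d =
        t.foldl (fun a w => a.insert w (a.getD w [] ++ [s0]))
          (d.insert w (d.getD w [] ++ [s0])) := rfl
    rw [hstep, ih, pv_getD_insert]
    by_cases hvw : w = v
    · subst hvw
      simp only [List.mem_append, List.mem_singleton, List.mem_cons, if_pos]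
      tauto
    · rw [if_neg hvw]
      simp only [List.mem_cons]
      constructor
      · rintro (h | ⟨hv, rfl⟩)
        · exact Or.inl h
        · exact Or.inr ⟨Or.inr hv, rfl⟩
      · rintro (h | ⟨(rfl | hv), rfl⟩)
        · exact Or.inl h
        · exact absurd rfl hvw
        · exact Or.inr ⟨hv, rfl⟩

theorem pv_adj_outer_mem : ∀ (l : List (Int × Int × List Int))
    (d : PySem.Dict Int (List (List Int))) (v : Int) (s : List Int),
    s ∈ (l.foldl (fun a edge =>
        edge.2.2.foldl (fun a w => a.insert w (a.getD w [] ++ [edge.2.2])) a) d).getD v [] ↔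
      s ∈ d.getD v [] ∨ ∃ e ∈ l, e.2.2 = s ∧ v ∈ e.2.2 := by
  intro l
  induction l with
  | nil => simp
  | cons e l ih =>
    intro d v s
    have hstep : ((e :: l).foldl (fun a edge =>
        edge.2.2.foldl (fun a w => a.insert w (a.getD w [] ++ [edge.2.2])) a) d) =
        l.foldl (fun a edge =>
          edge.2.2.foldl (fun a w => a.insert w (a.getD w [] ++ [edge.2.2])) a)
          (e.2.2.foldl (fun a w => a.insert w (a.getD w [] ++ [e.2.2])) d) := rfl
    rw [hstep, ih, pv_adj_inner_mem]
    simp only [List.mem_cons]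
    constructor
    · rintro ((h | ⟨hv, rfl⟩) | ⟨e', he', rfl, hv⟩)
      · exact Or.inl h
      · exact Or.inr ⟨e, Or.inl rfl, rfl, hv⟩
      · exact Or.inr ⟨e', Or.inr he', rfl, hv⟩
    · rintro (h | ⟨e', (rfl | he'), rfl, hv⟩)
      · exact Or.inl (Or.inl h)
      · exact Or.inl (Or.inr ⟨hv, rfl⟩)
      · exact Or.inr ⟨e', he', rfl, hv⟩

theorem pvBuildB_snd (edges : List (Int × Int × List Int)) :
    (pvBuildB edges).2 = edges.foldl (fun a e => PySem.Set.union a e.2.2) PySem.Set.empty := by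
  rw [show pvBuildB edges = _ from pvBuildB_proj edges PySem.Dict.empty PySem.Set.empty]

theorem pvBuildB_adj_mem (edges : List (Int × Int × List Int)) (v : Int) (s : List Int) :
    s ∈ (pvBuildB edges).1.getD v [] ↔ ∃ e ∈ edges, e.2.2 = s ∧ v ∈ e.2.2 := by
  rw [show pvBuildB edges = _ from pvBuildB_proj edges PySem.Dict.empty PySem.Set.empty]
  have h := pv_adj_outer_mem edges PySem.Dict.empty v s
  have h0 : (PySem.Dict.empty : PySem.Dict Int (List (List Int))).getD v [] = [] := rfl
  rw [h0] at h
  exact h.trans (by simp)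

theorem pvDfsFoldS_spec (s : List Int) : ∀ q : List Int × List Int,
    q.1 ⊆ (s.foldl (fun q u => if u ∈ q.1 then q else (q.1 ++ [u], u :: q.2)) q).1 ∧
    q.2 ⊆ (s.foldl (fun q u => if u ∈ q.1 then q else (q.1 ++ [u], u :: q.2)) q).2 ∧
    (q.1.Nodup → (s.foldl (fun q u => if u ∈ q.1 then q else (q.1 ++ [u], u :: q.2)) q).1.Nodup) ∧
    (s.foldl (fun q u => if u ∈ q.1 then q else (q.1 ++ [u], u :: q.2)) q).2.length + q.1.length =
      q.2.length + (s.foldl (fun q u => if u ∈ q.1 then q else (q.1 ++ [u], u :: q.2)) q).1.length ∧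
    (∀ x, x ∈ (s.foldl (fun q u => if u ∈ q.1 then q else (q.1 ++ [u], u :: q.2)) q).1 →
      x ∈ q.1 ∨ (x ∈ (s.foldl (fun q u => if u ∈ q.1 then q else (q.1 ++ [u], u :: q.2)) q).2 ∧ x ∈ s)) ∧
    (∀ u ∈ s, u ∈ (s.foldl (fun q u => if u ∈ q.1 then q else (q.1 ++ [u], u :: q.2)) q).1) ∧
    (q.2 ⊆ q.1 → (s.foldl (fun q u => if u ∈ q.1 then q else (q.1 ++ [u], u :: q.2)) q).2 ⊆
      (s.foldl (fun q u => if u ∈ q.1 then q else (q.1 ++ [u], u :: q.2)) q).1) := by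
  induction s with
  | nil =>
    intro q
    exact ⟨fun x h => h, fun x h => h, id, rfl, fun x h => Or.inl h, by simp, id⟩
  | cons u s ih =>
    intro q
    have hstep : (u :: s).foldl (fun q u => if u ∈ q.1 then q else (q.1 ++ [u], u :: q.2)) q =
        s.foldl (fun q u => if u ∈ q.1 then q else (q.1 ++ [u], u :: q.2))
          (if u ∈ q.1 then q else (q.1 ++ [u], u :: q.2)) := rfl
    rw [hstep]
    by_cases hu : u ∈ q.1
    · rw [if_pos hu]
      obtain ⟨i1, i2, i3, i4, i5, i6, i7⟩ := ih q
      exact ⟨i1, i2, i3, i4,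
        fun x hx => (i5 x hx).imp id (fun h => ⟨h.1, List.mem_cons_of_mem _ h.2⟩),
        fun w hw => by
          rcases List.mem_cons.mp hw with rfl | hw
          · exact i1 hu
          · exact i6 w hw,
        i7⟩
    · rw [if_neg hu]
      obtain ⟨i1, i2, i3, i4, i5, i6, i7⟩ := ih (q.1 ++ [u], u :: q.2)
      refine ⟨fun x hx => i1 (List.mem_append_left _ hx),
        fun x hx => i2 (List.mem_cons_of_mem _ hx), ?_, ?_, ?_, ?_, ?_⟩
      · intro hn
        apply i3
        rw [← List.concat_eq_append]
        exact hn.concat hu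
      · simp only [List.length_append, List.length_singleton, List.length_cons,
          List.length_nil] at i4 ⊢
        omega
      · intro x hx
        rcases i5 x hx with h | ⟨h1, h2⟩
        · rcases List.mem_append.mp h with h | h
          · exact Or.inl h
          · rw [List.mem_singleton] at h
            subst h
            exact Or.inr ⟨i2 (List.mem_cons_self ..), List.mem_cons_self ..⟩
        · exact Or.inr ⟨h1, List.mem_cons_of_mem _ h2⟩
      · intro w hw
        rcases List.mem_cons.mp hw with rfl | hw
        · exact i1 (List.mem_append_right _ (List.mem_singleton.mpr rfl))
        · exact i6 w hw
      · intro hq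
        apply i7
        intro x hx
        rcases List.mem_cons.mp hx with rfl | hx
        · exact List.mem_append_right _ (List.mem_singleton.mpr rfl)
        · exact List.mem_append_left _ (hq hx)

theorem pvDfsFoldL_spec (L : List (List Int)) : ∀ q : List Int × List Int,
    q.1 ⊆ (L.foldl (fun q s => s.foldl (fun q u => if u ∈ q.1 then q else (q.1 ++ [u], u :: q.2)) q) q).1 ∧
    q.2 ⊆ (L.foldl (fun q s => s.foldl (fun q u => if u ∈ q.1 then q else (q.1 ++ [u], u :: q.2)) q) q).2 ∧
    (q.1.Nodup → (L.foldl (fun q s => s.foldl (fun q u => if u ∈ q.1 then q else (q.1 ++ [u], u :: q.2)) q) q).1.Nodup) ∧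
    (L.foldl (fun q s => s.foldl (fun q u => if u ∈ q.1 then q else (q.1 ++ [u], u :: q.2)) q) q).2.length + q.1.length =
      q.2.length + (L.foldl (fun q s => s.foldl (fun q u => if u ∈ q.1 then q else (q.1 ++ [u], u :: q.2)) q) q).1.length ∧
    (∀ x, x ∈ (L.foldl (fun q s => s.foldl (fun q u => if u ∈ q.1 then q else (q.1 ++ [u], u :: q.2)) q) q).1 →
      x ∈ q.1 ∨ (x ∈ (L.foldl (fun q s => s.foldl (fun q u => if u ∈ q.1 then q else (q.1 ++ [u], u :: q.2)) q) q).2 ∧ ∃ s ∈ L, x ∈ s)) ∧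
    (∀ s ∈ L, ∀ u ∈ s, u ∈ (L.foldl (fun q s => s.foldl (fun q u => if u ∈ q.1 then q else (q.1 ++ [u], u :: q.2)) q) q).1) ∧
    (q.2 ⊆ q.1 → (L.foldl (fun q s => s.foldl (fun q u => if u ∈ q.1 then q else (q.1 ++ [u], u :: q.2)) q) q).2 ⊆
      (L.foldl (fun q s => s.foldl (fun q u => if u ∈ q.1 then q else (q.1 ++ [u], u :: q.2)) q) q).1) := by
  induction L with
  | nil =>
    intro q
    exact ⟨fun x h => h, fun x h => h, id, rfl, fun x h => Or.inl h, by simp, id⟩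
  | cons s L ih =>
    intro q
    have hstep : (s :: L).foldl
          (fun q s => s.foldl (fun q u => if u ∈ q.1 then q else (q.1 ++ [u], u :: q.2)) q) q =
        L.foldl (fun q s => s.foldl (fun q u => if u ∈ q.1 then q else (q.1 ++ [u], u :: q.2)) q)
          (s.foldl (fun q u => if u ∈ q.1 then q else (q.1 ++ [u], u :: q.2)) q) := rfl
    rw [hstep]
    obtain ⟨m1, m2, m3, m4, m5, m6, m7⟩ := pvDfsFoldS_spec s q
    obtain ⟨i1, i2, i3, i4, i5, i6, i7⟩ :=
      ih (s.foldl (fun q u => if u ∈ q.1 then q else (q.1 ++ [u], u :: q.2)) q)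
    refine ⟨fun x hx => i1 (m1 hx), fun x hx => i2 (m2 hx), fun hn => i3 (m3 hn),
      by omega, ?_, ?_, fun hq => i7 (m7 hq)⟩
    · intro x hx
      rcases i5 x hx with h | ⟨h1, s', hs', hxs'⟩
      · rcases m5 x h with h | ⟨h1, h2⟩
        · exact Or.inl h
        · exact Or.inr ⟨i2 h1, s, List.mem_cons_self .., h2⟩
      · exact Or.inr ⟨h1, s', List.mem_cons_of_mem _ hs', hxs'⟩
    · intro s' hs'
      rcases List.mem_cons.mp hs' with rfl | hs'
      · exact fun u hu => i1 (m6 u hu)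
      · exact i6 s' hs' 

-- the one-pop body of pvDfsB, named so the proofs can refer to it
def adjacency_fold (adj : PySem.Dict Int (List (List Int))) (v : Int)
    (seen : PySem.Set Int) (stack : List Int) : List Int × List Int :=
  (adj.getD v []).foldl (fun (q : List Int × List Int) s =>
    s.foldl (fun q u => if u ∈ q.1 then q else (q.1 ++ [u], u :: q.2)) q) (seen, stack)

theorem pvDfsB_eq (edges : List (Int × Int × List Int))
    (adj : PySem.Dict Int (List (List Int))) (S0 R : List Int)
    (hadj : ∀ v s, s ∈ adj.getD v [] ↔ ∃ e ∈ edges, e.2.2 = s ∧ v ∈ e.2.2)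
    (hRnd : R.Nodup) (hRm : ∀ x, x ∈ R ↔ pvReach edges S0 x) :
    ∀ (fuel : Nat) (stack : List Int) (seen : PySem.Set Int),
    seen.Nodup → (∀ x ∈ S0, x ∈ seen) → stack ⊆ seen →
    (∀ x ∈ seen, pvReach edges S0 x) →
    (∀ x ∈ seen, x ∉ stack → ∀ e ∈ edges, x ∈ e.2.2 → ∀ u ∈ e.2.2, u ∈ seen) →
    2 * R.length + stack.length < fuel + 2 * seen.length →
    (pvDfsB adj fuel stack seen).length = R.length := by
  intro fuel
  induction fuel with
  | zero =>
    intro stack seen h1 h2 h3 h4 h5 h6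
    exfalso
    have hsR : seen ⊆ R := fun x hx => (hRm x).mpr (h4 x hx)
    have := pv_nodup_length_le h1 hsR
    omega
  | succ fuel ih =>
    intro stack seen h1 h2 h3 h4 h5 h6
    cases stack with
    | nil =>
      have hres : pvDfsB adj (fuel + 1) [] seen = seen := rfl
      rw [hres]
      apply pv_nodup_length_eq h1 hRnd
      intro x
      constructor
      · exact fun hx => (hRm x).mpr (h4 x hx)
      · intro hx
        apply pv_closed_reach h2 _ x ((hRm x).mp hx)
        intro w hw e he hwe
        rw [PySem.Set.issubset_iff]
        exact h5 w hw (by simp) e he hwe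
    | cons v stack =>
      have hres : pvDfsB adj (fuel + 1) (v :: stack) seen =
          pvDfsB adj fuel
            ((adjacency_fold adj v seen stack).2) ((adjacency_fold adj v seen stack).1) := rfl
      obtain ⟨d1, d2, d3, d4, d5, d6, d7⟩ := pvDfsFoldL_spec (adj.getD v []) (seen, stack)
      rw [hres]
      apply ih
      · exact d3 h1
      · exact fun x hx => d1 (h2 x hx)
      · exact d7 (fun x hx => h3 (List.mem_cons_of_mem _ hx))
      · intro x hx
        rcases d5 x hx with h | ⟨hst, s, hs, hxs⟩
        · exact h4 x h
        · obtain ⟨e, he, hes, hve⟩ := (hadj v s).mp hs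
          exact pvReach.step he hve (h4 v (h3 (List.mem_cons_self ..))) (hes ▸ hxs)
      · intro x hxP hxnst e he hxe u hue
        by_cases hxs : x ∈ seen
        · by_cases hxv : x = v
          · subst hxv
            exact d6 _ ((hadj x e.2.2).mpr ⟨e, he, rfl, hxe⟩) u hue
          · have hxnotold : x ∉ v :: stack := by
              intro hmem
              rcases List.mem_cons.mp hmem with h | h
              · exact hxv h
              · exact hxnst (d2 h)
            exact d1 (h5 x hxs hxnotold e he hxe u hue)
        · rcases d5 x hxP with h | ⟨hst, _⟩
          · exact absurd h hxs
          · exact absurd hst hxnst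
      · have hsl : seen.length ≤ (adjacency_fold adj v seen stack).1.length :=
          pv_nodup_length_le h1 d1
        have harith := d4
        simp only [List.length_cons] at h6
        simp only [adjacency_fold] at hsl ⊢
        dsimp only at harith hsl ⊢
        omega

-- ===== VERDICT (by name: the statement is the Claim_ definition above) =====
theorem is_spanning_tree_spec : Claim_equal_is_spanning_tree := by
  intro num edges _
  unfold Spec_is_spanning_tree
  cases edges with
  | nil => rfl
  | cons e0 rest =>
    haveI : DecidablePred (pvReach (e0 :: rest) e0.2.2) := fun _ => Classical.propDecidable _
    have hVnd : ((e0 :: rest).foldl (fun a e => PySem.Set.union a e.2.2) PySem.Set.empty).Nodup :=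
      pv_nodup_foldl_union _ _ List.nodup_nil
    set V := (e0 :: rest).foldl (fun a e => PySem.Set.union a e.2.2) PySem.Set.empty with hV
    set R := V.filter (fun v => decide (pvReach (e0 :: rest) e0.2.2 v)) with hRdef
    have hRnd : R.Nodup := hVnd.filter _
    have hReachV : ∀ x, pvReach (e0 :: rest) e0.2.2 x → x ∈ V := by
      intro x h
      induction h with
      | base h =>
        exact (pv_mem_foldl_union ..).mpr (Or.inr ⟨e0, List.mem_cons_self .., h⟩)
      | step he _ _ hv =>
        exact (pv_mem_foldl_union ..).mpr (Or.inr ⟨_, he, hv⟩)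
    have hRm : ∀ x, x ∈ R ↔ pvReach (e0 :: rest) e0.2.2 x := by
      intro x
      rw [hRdef, List.mem_filter]
      constructor
      · rintro ⟨-, h⟩; exact of_decide_eq_true h
      · intro h; exact ⟨hReachV x h, decide_eq_true h⟩
    have hRV : R.length ≤ V.length :=
      pv_nodup_length_le hRnd (by rw [hRdef]; exact fun x hx => (List.mem_filter.mp hx).1)
    have hRVi : (R.length : Int) ≤ (V.length : Int) := by exact_mod_cast hRV
    have hconn : pvIsConnectedA (e0 :: rest) num = !decide ((R.length : Int) < num) := by
      have hC0 : PySem.Set.union PySem.Set.empty e0.2.2 = PySem.Set.ofList e0.2.2 := rfl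
      show pvWhileA (e0 :: rest) num ((pvAllVertsA (e0 :: rest)).length + 1)
          (PySem.Set.union PySem.Set.empty e0.2.2) = _
      rw [hC0]
      apply pvWhileA_eq _ _ _ _ hRnd hRm _ _ (PySem.Set.nodup_ofList _)
      · exact fun x hx => (PySem.Set.mem_ofList ..).mpr hx
      · exact fun x hx => pvReach.base ((PySem.Set.mem_ofList ..).mp hx)
      · have hAV : pvAllVertsA (e0 :: rest) = V := rfl
        rw [hAV]
        omega
    have hB2 : (pvBuildB (e0 :: rest)).2 = V := pvBuildB_snd _
    have hdfs : (pvDfsB (pvBuildB (e0 :: rest)).1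
        (2 * (pvBuildB (e0 :: rest)).2.length + (PySem.Set.ofList e0.2.2).length + 1)
        (PySem.Set.ofList e0.2.2) (PySem.Set.ofList e0.2.2)).length = R.length := by
      apply pvDfsB_eq (e0 :: rest) _ e0.2.2 R (pvBuildB_adj_mem (e0 :: rest)) hRnd hRm
      · exact PySem.Set.nodup_ofList _
      · exact fun x hx => (PySem.Set.mem_ofList ..).mpr hx
      · exact fun x hx => hx
      · exact fun x hx => pvReach.base ((PySem.Set.mem_ofList ..).mp hx)
      · intro x hx hnx; exact absurd hx hnx
      · rw [hB2]; omega
    have hA : is_spanning_tree num (e0 :: rest) =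
        (if !(pvIsConnectedA (e0 :: rest) num) then false
         else if PySem.Set.len V = num && (((e0 :: rest).length : Int) = num - 1)
           then true else false) := rfl
    have hBv : is_spanning_tree_alt num (e0 :: rest) =
        (if (((e0 :: rest).length : Int)) ≠ num - 1 then false
         else if PySem.Set.len (pvBuildB (e0 :: rest)).2 ≠ num then false
         else decide (PySem.Set.len (pvDfsB (pvBuildB (e0 :: rest)).1
             (2 * (pvBuildB (e0 :: rest)).2.length + (PySem.Set.ofList e0.2.2).length + 1)
             (PySem.Set.ofList e0.2.2) (PySem.Set.ofList e0.2.2)) = num)) := rfl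
    rw [hA, hBv, hconn]
    simp only [pv_setLen]
    simp only [hdfs]
    simp only [hB2]
    by_cases h1 : (((e0 :: rest).length : Int)) = num - 1
    · by_cases h2 : ((V.length : Int)) = num
      · by_cases h3 : ((R.length : Int)) < num
        · have hne : ¬ ((R.length : Int) = num) := by omega
          simp [h1, h2, h3, hne]
        · have heq : (R.length : Int) = num := by omega
          simp [h1, h2, h3, heq]
      · cases hc : decide ((R.length : Int) < num) <;> simp [h1, h2, hc]
    · have h1' : ¬((rest.length : Int) + 1 = num - 1) := by simpa using h1
      cases hc : decide ((R.length : Int) < num) <;> simp [h1', hc]
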